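-- pv_equiv track=rewrite | github.com/yoshility/mtrths_labo | test_time_scaling/utils.py | check_is_correct
-- ===== SOURCE A (Python) =====
-- def check_is_correct(dataset_name, gt, pred):
--     if dataset_name == 'gsm8k':
--         # put ',' in gt (e.g. 488000 -> 488,000)
--         i = len(gt)-1
--         cnt = 0
--         new_gt = ""
--         while i >= 0:
--             if cnt != 0 and cnt % 3 == 0:
--                 new_gt = ',' + new_gt
--             new_gt = gt[i] + new_gt
--             cnt += 1
--             i -= 1
--         # get final sentence from answer
--         new_pred = pred.split('\n\n')[-1]
--         return int(new_gt in new_pred or gt in new_pred)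
--
--     elif dataset_name == 'aime25':
--         answer_splited = pred.split('\n')
--         return int(gt in answer_splited[-1])
-- ===== SOURCE B (Python) =====
-- def _group(gt):
--     # comma-group from the right by recursion on the prefix: abcdefg -> a,bcd,efg
--     if len(gt) <= 3:
--         return gt
--     return _group(gt[:-3]) + ',' + gt[-3:]
--
-- def check_is_correct(dataset_name, gt, pred):
--     if dataset_name == 'gsm8k':
--         new_gt = _group(gt)
--         new_pred = pred.split('\n\n')[-1]
--         return int(new_gt in new_pred or gt in new_pred)
--     elif dataset_name == 'aime25':
--         return int(gt in pred.split('\n')[-1])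
-- ===== Notes on version B (the rewrite author's own statement) =====
-- stated objective: simpler
-- what changed: The gsm8k comma-grouping is computed by recursion on the 3-character-shorter prefix (group(s[:-3]) + ',' + s[-3:]) instead of A's per-character reverse loop with a counter and repeated string prepending; the aime25 branch keeps its structure.
import Mathlib
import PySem

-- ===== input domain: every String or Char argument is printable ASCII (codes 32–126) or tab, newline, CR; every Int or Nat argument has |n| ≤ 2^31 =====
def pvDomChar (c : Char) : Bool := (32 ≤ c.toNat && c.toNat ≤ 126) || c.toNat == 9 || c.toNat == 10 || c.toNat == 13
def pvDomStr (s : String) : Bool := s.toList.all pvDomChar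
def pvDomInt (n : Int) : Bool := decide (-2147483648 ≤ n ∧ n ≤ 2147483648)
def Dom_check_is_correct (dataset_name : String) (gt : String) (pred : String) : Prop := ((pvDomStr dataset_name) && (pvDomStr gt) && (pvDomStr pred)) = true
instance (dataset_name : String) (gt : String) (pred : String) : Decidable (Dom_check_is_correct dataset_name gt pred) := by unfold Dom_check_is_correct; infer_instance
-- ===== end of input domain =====

-- B replaces A's per-character comma-insertion loop (counter + prepend) by recursion on the
-- 3-character-shorter prefix; objective: simpler. Return values agree on all inputs (A is total).

-- ===== PORT A =====

-- xs[-1] on the (always non-empty) result of str.split(sep): Python's pred.split(sep)[-1].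
-- splitOn never returns [], so the .getD "" default is unreachable.
def pySplitLast (s : List Char) (sep : List Char) : List Char :=
  (PySem.List.pyGet? (PySem.Chars.splitOn s sep) (-1)).getD []

-- A's while loop: i runs len(gt)-1 .. 0, i.e. over gt's characters in reverse order;
-- cnt counts processed characters, new_gt is the accumulator built by prepending.
def aLoop : List Char → Nat → List Char → List Char
  | [], _, acc => acc
  | c :: rest, cnt, acc =>
      aLoop rest (cnt + 1) (c :: (if cnt ≠ 0 ∧ cnt % 3 = 0 then ',' :: acc else acc))

def check_is_correct (dataset_name : String) (gt : String) (pred : String) : Option Int :=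
  if dataset_name = "gsm8k" then
    let new_gt := aLoop gt.toList.reverse 0 []
    let new_pred := pySplitLast pred.toList ['\n', '\n']
    some (if PySem.Chars.isIn new_gt new_pred || PySem.Chars.isIn gt.toList new_pred then 1 else 0)
  else if dataset_name = "aime25" then
    some (if PySem.Chars.isIn gt.toList (pySplitLast pred.toList ['\n']) then 1 else 0)
  else none

-- ===== PORT B =====

-- B's _group: gt[:-3] = take (len-3) and gt[-3:] = drop (len-3), exact here since len > 3.
def grp (l : List Char) : List Char :=
  if _h : l.length ≤ 3 then l
  else grp (l.take (l.length - 3)) ++ ',' :: l.drop (l.length - 3)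
  termination_by l.length
  decreasing_by simp [List.length_take]; omega

def check_is_correct_alt (dataset_name : String) (gt : String) (pred : String) : Option Int :=
  if dataset_name = "gsm8k" then
    let new_gt := grp gt.toList
    let new_pred := pySplitLast pred.toList ['\n', '\n']
    some (if PySem.Chars.isIn new_gt new_pred || PySem.Chars.isIn gt.toList new_pred then 1 else 0)
  else if dataset_name = "aime25" then
    some (if PySem.Chars.isIn gt.toList (pySplitLast pred.toList ['\n']) then 1 else 0)
  else none

-- ===== PRECONDITION & SPEC =====
def Spec_check_is_correct (dataset_name : String) (gt : String) (pred : String) (out : Option Int) : Prop := out = check_is_correct_alt dataset_name gt pred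
instance (dataset_name : String) (gt : String) (pred : String) (out : Option Int) : Decidable (Spec_check_is_correct dataset_name gt pred out) := by unfold Spec_check_is_correct; infer_instance

-- ===== CLAIM (what is proved, stated in full; the proofs are below) =====
def Claim_equal_check_is_correct : Prop := ∀ (dataset_name : String) (gt : String) (pred : String), Dom_check_is_correct dataset_name gt pred → Spec_check_is_correct dataset_name gt pred (check_is_correct dataset_name gt pred)

-- ===== LEMMAS AND PROOFS =====

-- the accumulator is only ever appended to on the right
theorem aLoop_acc : ∀ (r : List Char) (cnt : Nat) (acc : List Char),
    aLoop r cnt acc = aLoop r cnt [] ++ acc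
  | [], _, _ => by simp [aLoop]
  | c :: rest, cnt, acc => by
    simp only [aLoop]
    rw [aLoop_acc rest (cnt + 1), aLoop_acc rest (cnt + 1) (c :: _)]
    split_ifs <;> simp

-- after the first step only cnt % 3 matters
theorem aLoop_cnt : ∀ (r : List Char) (c1 c2 : Nat) (acc : List Char),
    c1 % 3 = c2 % 3 → c1 ≠ 0 → c2 ≠ 0 → aLoop r c1 acc = aLoop r c2 acc
  | [], _, _, _, _, _, _ => by simp [aLoop]
  | c :: rest, c1, c2, acc, hm, h1, h2 => by
    simp only [aLoop, h1, h2, hm, ne_eq, not_false_eq_true, true_and]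
    exact aLoop_cnt rest (c1 + 1) (c2 + 1) _ (by omega) (by omega) (by omega)

-- at most three characters never trigger a comma
theorem aLoop_small (r : List Char) (acc : List Char) (h : r.length ≤ 3) :
    aLoop r 0 acc = r.reverse ++ acc := by
  match r with
  | [] => simp [aLoop]
  | [a] => simp [aLoop]
  | [a, b] => simp [aLoop]
  | [a, b, c] => simp [aLoop]
  | a :: b :: c :: d :: t => simp at h; omega

theorem aLoop_eq_grp (l : List Char) : aLoop l.reverse 0 [] = grp l := by
  induction hn : l.length using Nat.strong_induction_on generalizing l with
  | _ n ih =>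
    by_cases h3 : l.length ≤ 3
    · rw [grp, dif_pos h3, aLoop_small _ _ (by simpa using h3)]; simp
    · have hs3 : (l.drop (l.length - 3)).length = 3 := by simp [List.length_drop]; omega
      obtain ⟨a, b, c, hs⟩ := List.length_eq_three.mp hs3
      have hp : l.take (l.length - 3) ≠ [] := by
        intro he
        have := congrArg List.length he
        simp [List.length_take] at this; omega
      obtain ⟨d, r', hpr⟩ : ∃ d r', (l.take (l.length - 3)).reverse = d :: r' := by
        cases hh : (l.take (l.length - 3)).reverse with
        | nil => exact absurd (by simpa using hh) hp
        | cons d r' => exact ⟨d, r', rfl⟩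
      have hsplit : l = l.take (l.length - 3) ++ [a, b, c] := by
        conv_lhs => rw [← List.take_append_drop (l.length - 3) l]
        rw [hs]
      have hrev : l.reverse = c :: b :: a :: (d :: r') := by
        rw [hsplit]; simp [hpr]
      rw [hrev]
      simp only [aLoop]
      norm_num
      rw [aLoop_cnt r' 4 1 _ (by norm_num) (by omega) (by omega)]
      have : aLoop (d :: r') 0 (',' :: [a, b, c]) = aLoop r' 1 (d :: ',' :: [a, b, c]) := by
        simp [aLoop]
      rw [← this, ← hpr, aLoop_acc]
      conv_rhs => rw [grp]
      rw [dif_neg h3, hs,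
        ih (l.take (l.length - 3)).length (by simp [List.length_take]; omega) _ rfl]

-- ===== VERDICT (by name: the statement is the Claim_ definition above) =====
theorem check_is_correct_spec : Claim_equal_check_is_correct := by
  intro dataset_name gt pred _
  unfold Spec_check_is_correct check_is_correct check_is_correct_alt
  rw [aLoop_eq_grp]
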